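-- pv_equiv track=rewrite | github.com/gablyu-oci/oci-iaas-migration | backend/app/agents/job_result.py | _normalize_artifact_name
-- ===== SOURCE A (Python) =====
-- _KEY_EXTENSION_SUFFIXES = (
--     ("_yaml", ".yaml"),
--     ("_json", ".json"),
--     ("_html", ".html"),
--     ("_yml",  ".yml"),
--     ("_tf",   ".tf"),
--     ("_md",   ".md"),
--     ("_sh",   ".sh"),
--     ("_py",   ".py"),
--     ("_csv",  ".csv"),
--     ("_txt",  ".txt"),
-- )
--
-- def _normalize_artifact_name(key: str) -> str:
--     """Turn an LLM's dict key into a proper filename.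
--
--     Rules (first match wins):
--       - Already contains a '.' → leave alone (``main.tf`` stays ``main.tf``)
--       - Ends with a known extension suffix (``_tf``, ``_md``, …) → convert
--         that underscore to a dot (``main_tf`` → ``main.tf``)
--       - Otherwise → append ``.txt`` (same as before) so callers never see a
--         dotless file path.
--     """
--     if not key:
--         return "artifact.txt"
--     if "." in key:
--         return key
--     low = key.lower()
--     for suf, ext in _KEY_EXTENSION_SUFFIXES:
--         if low.endswith(suf) and len(key) > len(suf):
--             return key[:-len(suf)] + ext
--     return f"{key}.txt"
-- ===== SOURCE B (Python) =====
-- _EXT_BY_TOKEN = {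
--     "yaml": ".yaml",
--     "json": ".json",
--     "html": ".html",
--     "yml":  ".yml",
--     "tf":   ".tf",
--     "md":   ".md",
--     "sh":   ".sh",
--     "py":   ".py",
--     "csv":  ".csv",
--     "txt":  ".txt",
-- }
--
-- def _normalize_artifact_name(key: str) -> str:
--     if not key:
--         return "artifact.txt"
--     if "." in key:
--         return key
--     idx = key.rfind("_")
--     if idx > 0:
--         ext = _EXT_BY_TOKEN.get(key[idx + 1:].lower())
--         if ext is not None:
--             return key[:idx] + ext
--     return f"{key}.txt"
-- ===== Notes on version B (the rewrite author's own statement) =====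
-- stated objective: idiomatic
-- what changed: Replaces A's first-match linear scan over the ten known underscore-suffix pairs (each an endswith test on the whole lowered key) by a single split at the last underscore via rfind plus one dict lookup of the lowered trailing token.
import Mathlib
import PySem

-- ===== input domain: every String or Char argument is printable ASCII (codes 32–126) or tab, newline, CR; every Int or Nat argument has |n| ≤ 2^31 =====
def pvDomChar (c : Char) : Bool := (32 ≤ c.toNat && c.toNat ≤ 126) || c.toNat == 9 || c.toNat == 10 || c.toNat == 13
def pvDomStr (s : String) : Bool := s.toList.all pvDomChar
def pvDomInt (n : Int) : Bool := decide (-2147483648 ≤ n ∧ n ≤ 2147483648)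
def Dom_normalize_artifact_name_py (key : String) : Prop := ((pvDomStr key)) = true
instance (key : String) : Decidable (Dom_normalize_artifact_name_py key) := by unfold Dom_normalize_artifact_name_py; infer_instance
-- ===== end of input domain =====

-- B replaces A's linear first-match scan over the ten underscore-suffix pairs by a
-- single split at the last underscore (rfind) plus one dict lookup of the trailing
-- token (idiomatic; same cost).

-- ===== PORT A =====
-- "artifact.txt" / ".txt" as explicit char lists (exact String literals of A)
def pvArtifactTxt : List Char := ['a','r','t','i','f','a','c','t','.','t','x','t']
def pvDotTxt : List Char := ['.','t','x','t']

-- _KEY_EXTENSION_SUFFIXES, in A's order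
def pvSuffixes : List (List Char × List Char) :=
  [ (['_','y','a','m','l'], ['.','y','a','m','l'])
  , (['_','j','s','o','n'], ['.','j','s','o','n'])
  , (['_','h','t','m','l'], ['.','h','t','m','l'])
  , (['_','y','m','l'],     ['.','y','m','l'])
  , (['_','t','f'],         ['.','t','f'])
  , (['_','m','d'],         ['.','m','d'])
  , (['_','s','h'],         ['.','s','h'])
  , (['_','p','y'],         ['.','p','y'])
  , (['_','c','s','v'],     ['.','c','s','v'])
  , (['_','t','x','t'],     ['.','t','x','t']) ]

-- the 'for suf, ext in _KEY_EXTENSION_SUFFIXES' loop (first match returns, else fall through)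
def pvLoopA (key low : List Char) : List (List Char × List Char) → List Char
  | [] => key ++ pvDotTxt
  | (suf, ext) :: rest =>
    if PySem.Chars.endswith low suf && decide (suf.length < key.length) then
      PySem.List.slice key none (some (-(suf.length : Int))) ++ ext
    else pvLoopA key low rest

def pvNormA (l : List Char) : List Char :=
  if l = [] then pvArtifactTxt
  else if PySem.Chars.isIn ['.'] l then l
  else pvLoopA l (PySem.Chars.lower l) pvSuffixes

def normalize_artifact_name_py (key : String) : String :=
  String.ofList (pvNormA key.toList)

-- ===== PORT B =====
-- _EXT_BY_TOKEN: bare token -> extension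
def pvExtDict : PySem.Dict (List Char) (List Char) :=
  PySem.Dict.ofList
    [ (['y','a','m','l'], ['.','y','a','m','l'])
    , (['j','s','o','n'], ['.','j','s','o','n'])
    , (['h','t','m','l'], ['.','h','t','m','l'])
    , (['y','m','l'],     ['.','y','m','l'])
    , (['t','f'],         ['.','t','f'])
    , (['m','d'],         ['.','m','d'])
    , (['s','h'],         ['.','s','h'])
    , (['p','y'],         ['.','p','y'])
    , (['c','s','v'],     ['.','c','s','v'])
    , (['t','x','t'],     ['.','t','x','t']) ]

def pvNormB (l : List Char) : List Char :=
  if l = [] then pvArtifactTxt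
  else if PySem.Chars.isIn ['.'] l then l
  else
    let idx := PySem.Chars.rfind l ['_']
    if 0 < idx then
      match pvExtDict.get? (PySem.Chars.lower (PySem.List.slice l (some (idx + 1)) none)) with
      | some ext => PySem.List.slice l none (some idx) ++ ext
      | none => l ++ pvDotTxt
    else l ++ pvDotTxt

def normalize_artifact_name_py_alt (key : String) : String :=
  String.ofList (pvNormB key.toList)

-- ===== PRECONDITION & SPEC =====
def Spec_normalize_artifact_name_py (key : String) (out : String) : Prop := out = normalize_artifact_name_py_alt key
instance (key : String) (out : String) : Decidable (Spec_normalize_artifact_name_py key out) := by unfold Spec_normalize_artifact_name_py; infer_instance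

-- ===== CLAIM (what is proved, stated in full; the proofs are below) =====
def Claim_equal_normalize_artifact_name_py : Prop := ∀ (key : String), Dom_normalize_artifact_name_py key → Spec_normalize_artifact_name_py key (normalize_artifact_name_py key)

-- ===== LEMMAS AND PROOFS =====

-- lowerChar maps only A–Z; it hits '_' only at '_'
theorem pvLowerChar_underscore (c : Char) : PySem.Chars.lowerChar c = '_' ↔ c = '_' := by
  unfold PySem.Chars.lowerChar PySem.Chars.isupper
  by_cases h : ('A' ≤ c ∧ c ≤ 'Z')
  · have h1 : 65 ≤ c.toNat := h.1
    have h2 : c.toNat ≤ 90 := h.2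
    rw [if_pos (by simp [h.1, h.2])]
    have hval : Nat.isValidChar (c.toNat + 32) := Or.inl (by omega)
    have hv : (Char.ofNat (c.toNat + 32)).toNat = c.toNat + 32 := by
      rw [Char.toNat_ofNat, if_pos hval]
    constructor
    · intro he
      exfalso
      have := congrArg Char.toNat he
      rw [hv] at this
      have h95 : ('_' : Char).toNat = 95 := rfl
      omega
    · intro he; exfalso; subst he; exact absurd h.2 (by decide)
  · rw [if_neg (by rw [Bool.and_eq_true, decide_eq_true_eq, decide_eq_true_eq]; exact h)]

-- ['_'].isPrefixOf xs ↔ xs starts with '_'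
theorem pvPrefix_singleton (xs : List Char) :
    (['_'] : List Char).isPrefixOf xs = true ↔ ∃ t, xs = '_' :: t := by
  cases xs with
  | nil => simp [List.isPrefixOf]
  | cons a t =>
    constructor
    · intro h
      have ha : '_' = a := by simpa [List.isPrefixOf] using h
      exact ⟨t, by rw [← ha]⟩
    · rintro ⟨t', ht'⟩
      obtain ⟨ha, -⟩ := List.cons_eq_cons.mp ht'
      simp [List.isPrefixOf, ha]

-- rfind.go returns k when '_' sits at k and nowhere later (up to i)
theorem pvGo_eq_of (l : List Char) (k i : Nat) (hk : k ≤ i)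
    (hp : (['_'] : List Char).isPrefixOf (l.drop k) = true)
    (hafter : ∀ j, k < j → j ≤ i → (['_'] : List Char).isPrefixOf (l.drop j) = false) :
    PySem.Chars.rfind.go l ['_'] i = (k : Int) := by
  induction i with
  | zero =>
    have hk0 : k = 0 := Nat.le_zero.mp hk
    subst hk0
    simp only [PySem.Chars.rfind.go]
    simpa using hp
  | succ j ih =>
    simp only [PySem.Chars.rfind.go]
    by_cases hkj : k = j + 1
    · subst hkj; simp [hp]
    · have hkle : k ≤ j := by omega
      have hfalse := hafter (j + 1) (by omega) (by omega)
      rw [hfalse]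
      simp only [if_false, Bool.false_eq_true]
      exact ih hkle (fun m hm hm' => hafter m hm (by omega))

-- a strictly positive rfind.go result points at an '_' inside l
theorem pvGo_pos (l : List Char) (i : Nat) (idx : Int)
    (h : PySem.Chars.rfind.go l ['_'] i = idx) (hpos : 0 < idx) :
    ∃ k : Nat, idx = (k : Int) ∧ k ≤ i ∧ (['_'] : List Char).isPrefixOf (l.drop k) = true := by
  induction i with
  | zero =>
    exfalso
    simp only [PySem.Chars.rfind.go] at h
    split at h <;> omega
  | succ j ih =>
    simp only [PySem.Chars.rfind.go] at h
    split at h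
    · exact ⟨j + 1, h.symm, le_refl _, by assumption⟩
    · obtain ⟨k, hk1, hk2, hk3⟩ := ih h
      exact ⟨k, hk1, by omega, hk3⟩

-- core facts extracted from ' lower l ends with "_"++tok and l is longer than the suffix '
theorem pvSplit (l tok : List Char) (hund : '_' ∉ tok)
    (hend : ('_' :: tok) <:+ PySem.Chars.lower l) (hlen : tok.length + 1 < l.length) :
    PySem.Chars.rfind l ['_'] = ((l.length - (tok.length + 1) : Nat) : Int) ∧
    PySem.Chars.lower (l.drop (l.length - tok.length)) = tok := by
  set p : Nat := l.length - (tok.length + 1) with hp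
  obtain ⟨t, ht⟩ := hend
  have hlenlow : (PySem.Chars.lower l).length = l.length := by
    simp [PySem.Chars.lower]
  have htlen : t.length = p := by
    have := congrArg List.length ht
    simp [hlenlow] at this
    omega
  have hdropP : (PySem.Chars.lower l).drop p = '_' :: tok := by
    rw [← ht, ← htlen, List.drop_left]
  have hdropP' : List.map PySem.Chars.lowerChar (l.drop p) = '_' :: tok := by
    rw [PySem.Chars.lower] at hdropP
    rw [List.map_drop]; exact hdropP
  -- l.drop p = '_' :: r with lower r = tok
  obtain ⟨c, r, hcr⟩ : ∃ c r, l.drop p = c :: r := by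
    cases hdp : l.drop p with
    | nil => rw [hdp] at hdropP'; simp at hdropP'
    | cons c r => exact ⟨c, r, rfl⟩
  rw [hcr] at hdropP'
  simp only [List.map_cons, List.cons.injEq] at hdropP'
  have hc : c = '_' := (pvLowerChar_underscore c).mp hdropP'.1
  have hr : List.map PySem.Chars.lowerChar r = tok := hdropP'.2
  have hdropP1 : l.drop (p + 1) = r := by
    rw [← List.drop_drop, hcr]; simp
  have hnor : '_' ∉ r := by
    intro hmem
    have : PySem.Chars.lowerChar '_' ∈ tok := hr ▸ List.mem_map_of_mem hmem
    have h95 : PySem.Chars.lowerChar '_' = '_' := (pvLowerChar_underscore '_').mpr rfl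
    exact hund (h95 ▸ this)
  have hrfind : PySem.Chars.rfind l ['_'] = (p : Int) := by
    unfold PySem.Chars.rfind
    apply pvGo_eq_of l p l.length (by omega)
    · rw [hcr, hc]; simp [List.isPrefixOf]
    · intro j hj _
      by_contra hb
      have hb' : (['_'] : List Char).isPrefixOf (l.drop j) = true := by
        cases hbe : (['_'] : List Char).isPrefixOf (l.drop j) with
        | true => rfl
        | false => exact absurd hbe hb
      obtain ⟨t', ht'⟩ := (pvPrefix_singleton _).mp hb'
      have hsub : l.drop j ⊆ r := by
        rw [← hdropP1]
        have : l.drop j = (l.drop (p+1)).drop (j - (p+1)) := by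
          rw [List.drop_drop]; congr 1; omega
        rw [this]; exact List.drop_subset _ _
      have : '_' ∈ r := hsub (by rw [ht']; simp)
      exact hnor this
  refine ⟨hrfind, ?_⟩
  have hpt : l.length - tok.length = p + 1 := by omega
  rw [hpt, hdropP1]
  simpa [PySem.Chars.lower] using hr

-- the matched case: both sides produce take (len-|suf|) ++ ext
theorem pvMatched (l tok ext : List Char) (hne : l ≠ []) (hdot : ¬ PySem.Chars.isIn ['.'] l = true)
    (hund : '_' ∉ tok)
    (hend : PySem.Chars.endswith (PySem.Chars.lower l) ('_' :: tok) = true)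
    (hlen : tok.length + 1 < l.length)
    (hget : pvExtDict.get? tok = some ext) :
    pvNormB l = l.take (l.length - (tok.length + 1)) ++ ext := by
  have hend' : ('_' :: tok) <:+ PySem.Chars.lower l := (PySem.Chars.endswith_iff _ _).mp hend
  obtain ⟨hrf, hlowdrop⟩ := pvSplit l tok hund hend' hlen
  set p : Nat := l.length - (tok.length + 1) with hp
  unfold pvNormB
  rw [if_neg hne, if_neg hdot]
  simp only [hrf]
  have hppos : (0 : Int) < (p : Int) := by
    have : 0 < p := by omega
    exact_mod_cast this
  rw [if_pos hppos]
  have hslice1 : PySem.List.slice l (some ((p : Int) + 1)) none = l.drop (p + 1) := by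
    have : ((p : Int) + 1) = ((p + 1 : Nat) : Int) := by push_cast; ring
    rw [this, PySem.List.slice_from_natCast]
  have hp1 : p + 1 = l.length - tok.length := by omega
  rw [hslice1, hp1, hlowdrop, hget]
  have hslice2 : PySem.List.slice l none (some (p : Int)) = l.take p := by
    rw [PySem.List.slice_to_natCast]
  rw [hslice2]

-- from an '_' at position k and token = lower(l[k+1:]), A's suffix test holds
theorem pvBack (l tok : List Char) (k : Nat) (hkl : k < l.length)
    (hu : l.drop k = '_' :: l.drop (k + 1))
    (htok : PySem.Chars.lower (l.drop (k + 1)) = tok) (hkpos : 0 < k) :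
    PySem.Chars.endswith (PySem.Chars.lower l) ('_' :: tok) = true ∧ tok.length + 1 < l.length := by
  have hdl : (l.drop k).length = l.length - k := by simp
  have htl : tok.length = l.length - (k + 1) := by
    rw [← htok]; simp [PySem.Chars.lower]
  constructor
  · rw [PySem.Chars.endswith_iff]
    refine ⟨(PySem.Chars.lower l).take k, ?_⟩
    have : (PySem.Chars.lower l).drop k = '_' :: tok := by
      rw [PySem.Chars.lower, ← List.map_drop, hu]
      simp only [List.map_cons, List.cons.injEq]
      exact ⟨(pvLowerChar_underscore '_').mpr rfl, htok ▸ rfl⟩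
    rw [← this, List.take_append_drop]
  · omega

-- enumerate the dict: a successful lookup pins the token to one of the ten literals
theorem pvDict_cases (t ext : List Char) (h : pvExtDict.get? t = some ext) :
    t = ['y','a','m','l'] ∨ t = ['j','s','o','n'] ∨ t = ['h','t','m','l'] ∨
    t = ['y','m','l'] ∨ t = ['t','f'] ∨ t = ['m','d'] ∨ t = ['s','h'] ∨
    t = ['p','y'] ∨ t = ['c','s','v'] ∨ t = ['t','x','t'] := by
  have hmem : t ∈ pvExtDict.keys := by
    by_contra hnm
    have hnone : pvExtDict.get? t = none := by
      rw [PySem.Dict.get?_eq_none_iff_not_mem_keys]; exact hnm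
    rw [hnone] at h; exact absurd h (by simp)
  have hkeys : pvExtDict.keys =
      [['y','a','m','l'], ['j','s','o','n'], ['h','t','m','l'], ['y','m','l'], ['t','f'],
       ['m','d'], ['s','h'], ['p','y'], ['c','s','v'], ['t','x','t']] := by decide
  rw [hkeys] at hmem
  simpa using hmem

-- the unmatched case: if none of A's ten tests fires, B falls through to .txt too
theorem pvUnmatched (l : List Char) (hne : l ≠ []) (hdot : ¬ PySem.Chars.isIn ['.'] l = true)
    (hno : ∀ suf, suf ∈ pvSuffixes.map Prod.fst →
      ¬ (PySem.Chars.endswith (PySem.Chars.lower l) suf = true ∧ suf.length < l.length)) :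
    pvNormB l = l ++ pvDotTxt := by
  unfold pvNormB
  rw [if_neg hne, if_neg hdot]
  by_cases hpos : (0 : Int) < PySem.Chars.rfind l ['_']
  · rw [if_pos hpos]
    obtain ⟨k, hk1, hk2, hk3⟩ :=
      pvGo_pos l l.length _ rfl hpos
    have hkpos : 0 < k := by
      have : (0 : Int) < (k : Int) := hk1 ▸ hpos
      exact_mod_cast this
    obtain ⟨t', ht'⟩ := (pvPrefix_singleton _).mp hk3
    have hkl : k < l.length := by
      by_contra hge
      have : l.drop k = [] := List.drop_eq_nil_of_le (by omega)
      rw [this] at ht'; exact absurd ht' (by simp)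
    have hrf : PySem.Chars.rfind l ['_'] = (k : Int) := by
      unfold PySem.Chars.rfind; exact hk1
    have ht'' : l.drop (k + 1) = t' := by
      have h1 : l.drop (k + 1) = List.drop 1 (List.drop k l) := by rw [List.drop_drop]
      rw [h1, ht']; rfl
    have hu : l.drop k = '_' :: l.drop (k + 1) := by rw [ht'', ht']
    cases hget : pvExtDict.get? (PySem.Chars.lower (PySem.List.slice l (some (PySem.Chars.rfind l ['_'] + 1)) none)) with
    | none => rfl
    | some ext =>
      exfalso
      have hslice : PySem.List.slice l (some (PySem.Chars.rfind l ['_'] + 1)) none = l.drop (k + 1) := by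
        rw [hrf]
        have : ((k : Int) + 1) = ((k + 1 : Nat) : Int) := by push_cast; ring
        rw [this, PySem.List.slice_from_natCast]
      rw [hslice] at hget
      set tok := PySem.Chars.lower (l.drop (k + 1)) with htokdef
      obtain ⟨hend, hlen⟩ := pvBack l tok k hkl hu rfl hkpos
      have hmem : ('_' :: tok) ∈ pvSuffixes.map Prod.fst := by
        rcases pvDict_cases tok ext hget with h | h | h | h | h | h | h | h | h | h <;>
          · rw [h]; simp [pvSuffixes]
      exact hno ('_' :: tok) hmem ⟨hend, by simpa using hlen⟩
  · rw [if_neg hpos]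

-- one A-branch ↔ B agreement, for a literal suffix '_'::tok with its ext
theorem pvBranch (l tok ext : List Char) (hne : l ≠ []) (hdot : ¬ PySem.Chars.isIn ['.'] l = true)
    (hund : '_' ∉ tok)
    (hget : pvExtDict.get? tok = some ext)
    (hcond : (PySem.Chars.endswith (PySem.Chars.lower l) ('_' :: tok) && decide (('_' :: tok).length < l.length)) = true) :
    PySem.List.slice l none (some (-((('_' :: tok).length : Nat) : Int))) ++ ext = pvNormB l := by
  rw [Bool.and_eq_true, decide_eq_true_eq] at hcond
  obtain ⟨hend, hlen⟩ := hcond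
  have hlen' : tok.length + 1 < l.length := by simpa using hlen
  rw [pvMatched l tok ext hne hdot hund hend hlen' hget]
  congr 1
  rw [PySem.List.slice_to_neg_natCast l _ (by simp)]
  congr 1

-- the list-level equivalence
theorem pvNorm_eq (l : List Char) : pvNormA l = pvNormB l := by
  unfold pvNormA
  by_cases hne : l = []
  · simp [hne, pvNormB]
  by_cases hdot : PySem.Chars.isIn ['.'] l = true
  · simp [hne, hdot, pvNormB]
  rw [if_neg hne, if_neg hdot]
  simp only [pvSuffixes, pvLoopA]
  -- walk A's ten tests in order
  by_cases c1 : (PySem.Chars.endswith (PySem.Chars.lower l) ['_','y','a','m','l'] && decide ((['_','y','a','m','l'] : List Char).length < l.length)) = true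
  · rw [if_pos c1]; exact pvBranch l ['y','a','m','l'] _ hne hdot (by decide) (by decide) c1
  rw [if_neg c1]
  by_cases c2 : (PySem.Chars.endswith (PySem.Chars.lower l) ['_','j','s','o','n'] && decide ((['_','j','s','o','n'] : List Char).length < l.length)) = true
  · rw [if_pos c2]; exact pvBranch l ['j','s','o','n'] _ hne hdot (by decide) (by decide) c2
  rw [if_neg c2]
  by_cases c3 : (PySem.Chars.endswith (PySem.Chars.lower l) ['_','h','t','m','l'] && decide ((['_','h','t','m','l'] : List Char).length < l.length)) = true
  · rw [if_pos c3]; exact pvBranch l ['h','t','m','l'] _ hne hdot (by decide) (by decide) c3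
  rw [if_neg c3]
  by_cases c4 : (PySem.Chars.endswith (PySem.Chars.lower l) ['_','y','m','l'] && decide ((['_','y','m','l'] : List Char).length < l.length)) = true
  · rw [if_pos c4]; exact pvBranch l ['y','m','l'] _ hne hdot (by decide) (by decide) c4
  rw [if_neg c4]
  by_cases c5 : (PySem.Chars.endswith (PySem.Chars.lower l) ['_','t','f'] && decide ((['_','t','f'] : List Char).length < l.length)) = true
  · rw [if_pos c5]; exact pvBranch l ['t','f'] _ hne hdot (by decide) (by decide) c5
  rw [if_neg c5]
  by_cases c6 : (PySem.Chars.endswith (PySem.Chars.lower l) ['_','m','d'] && decide ((['_','m','d'] : List Char).length < l.length)) = true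
  · rw [if_pos c6]; exact pvBranch l ['m','d'] _ hne hdot (by decide) (by decide) c6
  rw [if_neg c6]
  by_cases c7 : (PySem.Chars.endswith (PySem.Chars.lower l) ['_','s','h'] && decide ((['_','s','h'] : List Char).length < l.length)) = true
  · rw [if_pos c7]; exact pvBranch l ['s','h'] _ hne hdot (by decide) (by decide) c7
  rw [if_neg c7]
  by_cases c8 : (PySem.Chars.endswith (PySem.Chars.lower l) ['_','p','y'] && decide ((['_','p','y'] : List Char).length < l.length)) = true
  · rw [if_pos c8]; exact pvBranch l ['p','y'] _ hne hdot (by decide) (by decide) c8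
  rw [if_neg c8]
  by_cases c9 : (PySem.Chars.endswith (PySem.Chars.lower l) ['_','c','s','v'] && decide ((['_','c','s','v'] : List Char).length < l.length)) = true
  · rw [if_pos c9]; exact pvBranch l ['c','s','v'] _ hne hdot (by decide) (by decide) c9
  rw [if_neg c9]
  by_cases c10 : (PySem.Chars.endswith (PySem.Chars.lower l) ['_','t','x','t'] && decide ((['_','t','x','t'] : List Char).length < l.length)) = true
  · rw [if_pos c10]; exact pvBranch l ['t','x','t'] _ hne hdot (by decide) (by decide) c10
  rw [if_neg c10]
  -- no test fired: B falls through too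
  rw [pvUnmatched l hne hdot]
  intro suf hsuf ⟨hend, hlen⟩
  have hbool : ∀ s : List Char, (PySem.Chars.endswith (PySem.Chars.lower l) s && decide (s.length < l.length)) = true ↔
      (PySem.Chars.endswith (PySem.Chars.lower l) s = true ∧ s.length < l.length) := by
    intro s; rw [Bool.and_eq_true, decide_eq_true_eq]
  simp only [pvSuffixes, List.map_cons, List.map_nil, List.mem_cons, List.not_mem_nil, or_false] at hsuf
  rcases hsuf with h | h | h | h | h | h | h | h | h | h <;>
    subst h <;>
    first
    | exact c1 ((hbool _).mpr ⟨hend, hlen⟩)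
    | exact c2 ((hbool _).mpr ⟨hend, hlen⟩)
    | exact c3 ((hbool _).mpr ⟨hend, hlen⟩)
    | exact c4 ((hbool _).mpr ⟨hend, hlen⟩)
    | exact c5 ((hbool _).mpr ⟨hend, hlen⟩)
    | exact c6 ((hbool _).mpr ⟨hend, hlen⟩)
    | exact c7 ((hbool _).mpr ⟨hend, hlen⟩)
    | exact c8 ((hbool _).mpr ⟨hend, hlen⟩)
    | exact c9 ((hbool _).mpr ⟨hend, hlen⟩)
    | exact c10 ((hbool _).mpr ⟨hend, hlen⟩)

-- ===== VERDICT (by name: the statement is the Claim_ definition above) =====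
theorem normalize_artifact_name_py_spec : Claim_equal_normalize_artifact_name_py := by
  intro key _
  unfold Spec_normalize_artifact_name_py normalize_artifact_name_py normalize_artifact_name_py_alt
  rw [pvNorm_eq]
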